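-- pv_equiv track=rewrite | github.com/Pwnafication/Runescape-Services | Leetcode/BitPunch/FindSingle.py | findSingles
-- ===== SOURCE A (Python) =====
-- def findSingles(daArray):
--     dct_Numbers = {}
--     last = None
--     for each in daArray:
--         if each in dct_Numbers:
--             dct_Numbers[each] += 1
--         else:
--             dct_Numbers[each] = 1
--
--         # Check if the previous number appeared only once
--         if last is not None and dct_Numbers[last] == 1 and each != last:
--             return last
--
--         last = each
--
--     # Final check in case the last number is the single one
--     if last is not None and dct_Numbers[last] == 1:
--         return last
--
--     return None  # No single element found
-- ===== SOURCE B (Python) =====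
-- def findSingles(daArray):
--     daArray = list(daArray)
--     n = len(daArray)
--     first_index = {}
--     for i, x in enumerate(daArray):
--         if x not in first_index:
--             first_index[x] = i
--     for i, x in enumerate(daArray):
--         if first_index[x] == i and (i + 1 == n or daArray[i + 1] != x):
--             return x
--     return None
-- ===== Notes on version B (the rewrite author's own statement) =====
-- stated objective: alternative
-- what changed: Replaced A's single stateful pass (running counter dict + `last` variable with a delayed check and a post-loop final check) by a two-pass table-then-scan: precompute each value's first-occurrence index, then return the first element that is its own first occurrence and whose successor (if any) differs.
import Mathlib
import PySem

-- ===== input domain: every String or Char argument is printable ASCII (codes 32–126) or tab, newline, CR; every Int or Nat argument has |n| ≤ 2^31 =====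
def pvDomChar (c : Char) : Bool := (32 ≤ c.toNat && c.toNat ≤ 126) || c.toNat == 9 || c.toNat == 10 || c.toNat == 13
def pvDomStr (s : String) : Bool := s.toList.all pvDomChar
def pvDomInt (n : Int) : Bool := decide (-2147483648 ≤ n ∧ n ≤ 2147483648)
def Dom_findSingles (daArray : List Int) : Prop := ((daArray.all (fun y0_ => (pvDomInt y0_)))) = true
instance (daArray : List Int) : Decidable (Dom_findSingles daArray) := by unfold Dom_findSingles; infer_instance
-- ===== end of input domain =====

-- B replaces A's single counting pass (counter dict + `last`, early return) with two passes: a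
-- precomputed first-occurrence index table, then a look-ahead scan (objective: alternative
-- decomposition, same cost class).

-- ===== PORT A =====
-- A's loop: counter dict + `last`; return `last` when, after counting the current element,
-- `last` still counts 1 and the current element differs; final check after the loop
def findSinglesGo (dct : PySem.Dict Int Int) (last : Option Int) : List Int → Option Int
  | [] =>
    match last with
    | some l => if dct.getD l 0 = 1 then some l else none
    | none => none
  | x :: rest =>
    let d := if dct.contains x then dct.modify x 0 (· + 1) else dct.insert x 1
    match last with
    | some l => if d.getD l 0 = 1 ∧ x ≠ l then some l else findSinglesGo d (some x) rest
    | none => findSinglesGo d (some x) rest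

def findSingles (daArray : List Int) : Option Int :=
  findSinglesGo PySem.Dict.empty none daArray

-- ===== PORT B =====
-- Source B's second loop: return x at (i, x) as soon as first_index[x] == i and (i+1 == n or a[i+1] != x)
def findSinglesScan (a : List Int) (n : Int) (fi : PySem.Dict Int Int) : List (Int × Int) → Option Int
  | [] => none
  | p :: rest =>
    if fi.get? p.2 = some p.1 ∧ (p.1 + 1 = n ∨ PySem.List.pyGet? a (p.1 + 1) ≠ some p.2) then
      some p.2
    else findSinglesScan a n fi rest

-- Source B: build the first-occurrence table (insert only if the key is absent), then scan
def findSingles_alt (daArray : List Int) : Option Int :=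
  let n : Int := daArray.length
  let fi := (PySem.List.enumerate daArray).foldl
    (fun d p => if d.contains p.2 then d else d.insert p.2 p.1) PySem.Dict.empty
  findSinglesScan daArray n fi (PySem.List.enumerate daArray)

-- ===== PRECONDITION & SPEC =====
def Spec_findSingles (daArray : List Int) (out : Option Int) : Prop := out = findSingles_alt daArray
instance (daArray : List Int) (out : Option Int) : Decidable (Spec_findSingles daArray out) := by unfold Spec_findSingles; infer_instance

-- ===== CLAIM (what is proved, stated in full; the proofs are below) =====
def Claim_equal_findSingles : Prop := ∀ (daArray : List Int), Dom_findSingles daArray → Spec_findSingles daArray (findSingles daArray)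

-- ===== LEMMAS AND PROOFS =====

-- common reference point: scanning left to right with `pre` = elements already seen, return the
-- first x with no earlier occurrence whose successor (if any) differs
def gspec (pre : List Int) : List Int → Option Int
  | [] => none
  | x :: rest =>
    if x ∉ pre ∧ rest.head? ≠ some x then some x else gspec (pre ++ [x]) rest

lemma count_app (pre : List Int) (l v : Int) :
    (pre ++ [l]).count v = pre.count v + (if l = v then 1 else 0) := by
  simp [List.count_append, List.count_singleton]

lemma goA_eq (xs : List Int) : ∀ (pre : List Int) (l : ℤ) (dct : PySem.Dict ℤ ℤ),
    (∀ v, dct.getD v 0 = ((pre ++ [l]).count v : Int)) →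
    (∀ v, dct.contains v = decide (v ∈ pre ++ [l])) →
    findSinglesGo dct (some l) xs = gspec pre (l :: xs) := by
  induction xs with
  | nil =>
    intro pre l dct hg _
    have h1 : dct.getD l 0 = 1 ↔ l ∉ pre := by
      rw [hg l, count_app pre l l, if_pos rfl, ← List.count_eq_zero (a := l) (l := pre)]
      push_cast
      omega
    simp only [findSinglesGo, gspec]
    by_cases hm : l ∈ pre
    · rw [if_neg (by rw [h1]; exact fun h => h hm), if_neg (by simp [hm])]
    · rw [if_pos (h1.mpr hm), if_pos (by simp [hm])]
  | cons x rest ih =>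
    intro pre l dct hg hc
    simp only [findSinglesGo]
    set d := if dct.contains x then dct.modify x 0 (· + 1) else dct.insert x 1 with hd
    have hg' : ∀ v, d.getD v 0 = (((pre ++ [l]) ++ [x]).count v : Int) := by
      intro v
      rw [count_app (pre ++ [l]) x v, hd]
      by_cases hx : x ∈ pre ++ [l]
      · rw [if_pos (by rw [hc x]; simp [hx]), PySem.Dict.getD_modify, hg v]
        by_cases hvx : v = x
        · simp only [hvx, hg x]
          push_cast [List.count_append]
          ring
        · rw [if_neg hvx, if_neg (fun h => hvx h.symm)]
          push_cast
          ring
      · rw [if_neg (by rw [hc x]; simp [hx]), PySem.Dict.getD_insert]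
        by_cases hvx : v = x
        · subst hvx
          have h0 : (pre ++ [l]).count v = 0 := List.count_eq_zero.mpr hx
          simp [h0]
        · rw [if_neg hvx, hg v]
          have : ¬ (x = v) := fun h => hvx h.symm
          simp [this]
    have hc' : ∀ v, d.contains v = decide (v ∈ (pre ++ [l]) ++ [x]) := by
      intro v
      rw [hd]
      by_cases hx : x ∈ pre ++ [l]
      · rw [if_pos (by rw [hc x]; simp [hx]), PySem.Dict.contains_modify, hc v]
        by_cases hvx : v = x <;> simp [hvx, hx]
      · rw [if_neg (by rw [hc x]; simp [hx]), PySem.Dict.contains_insert, hc v]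
        by_cases hvx : v = x <;> simp [hvx]
    have hcond : (d.getD l 0 = 1 ∧ x ≠ l) ↔ (l ∉ pre ∧ (x :: rest).head? ≠ some l) := by
      rw [hg' l, count_app (pre ++ [l]) x l, count_app pre l l, if_pos rfl]
      have hhd : ((x :: rest).head? ≠ some l) ↔ x ≠ l := by simp
      rw [hhd]
      constructor
      · rintro ⟨h1, h2⟩
        refine ⟨?_, h2⟩
        rw [if_neg (fun h => h2 h)] at h1
        rw [← List.count_eq_zero]
        omega
      · rintro ⟨h1, h2⟩
        refine ⟨?_, h2⟩
        rw [if_neg (fun h => h2 h)]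
        rw [← List.count_eq_zero] at h1
        omega
    by_cases hcase : l ∉ pre ∧ (x :: rest).head? ≠ some l
    · rw [if_pos (hcond.mpr hcase)]
      conv_rhs => rw [gspec]
      rw [if_pos hcase]
    · rw [if_neg (fun h => hcase (hcond.mp h))]
      conv_rhs => rw [gspec]
      rw [if_neg hcase]
      exact ih (pre ++ [l]) x d hg' hc'

lemma fold_first (ps : List (Int × Int)) : ∀ (d : PySem.Dict Int Int) (v : Int),
    (ps.foldl (fun d p => if d.contains p.2 then d else d.insert p.2 p.1) d).get? v =
      ((d.get? v).or ((ps.find? (fun p => p.2 == v)).map (·.1))) := by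
  induction ps with
  | nil => intro d v; simp
  | cons p rest ih =>
    intro d v
    simp only [List.foldl_cons]
    by_cases hv : p.2 = v
    · subst hv
      rw [List.find?_cons_of_pos (h := by simp)]
      by_cases hc : d.contains p.2
      · rw [if_pos hc, ih d p.2]
        have hs : (d.get? p.2).isSome := by
          rw [← PySem.Dict.contains_eq_isSome_get?]; exact hc
        obtain ⟨w, hw⟩ := Option.isSome_iff_exists.mp hs
        simp [hw]
      · have hnone : d.get? p.2 = none := by
          rw [PySem.Dict.contains_eq_isSome_get?] at hc
          simpa using hc
        rw [if_neg hc, ih _ p.2]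
        simp [hnone]
    · rw [List.find?_cons_of_neg (h := by simp [hv])]
      by_cases hc : d.contains p.2
      · rw [if_pos hc, ih d v]
      · rw [if_neg hc, ih _ v, PySem.Dict.get?_insert, if_neg (fun h => hv h.symm)]

lemma find_enum_not_mem (x : Int) (rest : List Int) : ∀ (pre : List Int) (s : Int), x ∉ pre →
    (PySem.List.enumerate (pre ++ x :: rest) s).find? (fun p => p.2 == x)
      = some (s + pre.length, x) := by
  intro pre
  induction pre with
  | nil => intro s _; simp [PySem.List.enumerate_cons]
  | cons y ys ih =>
    intro s hm
    have hyx : ¬ (y = x) := fun h => hm (by simp [h])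
    rw [List.cons_append, PySem.List.enumerate_cons,
      List.find?_cons_of_neg (h := by simpa using hyx),
      ih (s + 1) (fun h => hm (List.mem_cons_of_mem _ h)),
      show s + 1 + (ys.length : Int) = s + ((y :: ys).length : Int) by
        simp only [List.length_cons]; push_cast; ring]

lemma find_enum_mem (x : Int) : ∀ (pre rest : List Int) (s : Int), x ∈ pre →
    ∃ j, (PySem.List.enumerate (pre ++ rest) s).find? (fun p => p.2 == x) = some (j, x)
        ∧ j < s + pre.length := by
  intro pre
  induction pre with
  | nil => intro rest s h; simp at h
  | cons y ys ih =>
    intro rest s hm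
    rw [List.cons_append, PySem.List.enumerate_cons]
    by_cases hyx : y = x
    · subst hyx
      rw [List.find?_cons_of_pos (h := by simp)]
      exact ⟨s, rfl, by simp only [List.length_cons]; push_cast; omega⟩
    · rw [List.find?_cons_of_neg (h := by simpa using hyx)]
      have hx : x ∈ ys := by
        rcases List.mem_cons.mp hm with h | h
        · exact absurd h.symm hyx
        · exact h
      obtain ⟨j, hj, hlt⟩ := ih rest (s + 1) hx
      refine ⟨j, hj, ?_⟩
      simp only [List.length_cons]
      push_cast
      omega

lemma scanB_eq (a : List Int) (fi : PySem.Dict Int Int)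
    (hfi : ∀ v, fi.get? v = ((PySem.List.enumerate a).find? (fun p => p.2 == v)).map (·.1)) :
    ∀ (suf pre : List Int), a = pre ++ suf →
    findSinglesScan a (a.length : Int) fi (PySem.List.enumerate suf (pre.length : Int))
      = gspec pre suf := by
  intro suf
  induction suf with
  | nil => intro pre _; rw [PySem.List.enumerate_nil]; rfl
  | cons x rest ih =>
    intro pre ha
    rw [PySem.List.enumerate_cons]
    simp only [findSinglesScan]
    have hC1 : fi.get? x = some (pre.length : Int) ↔ x ∉ pre := by
      rw [hfi x]
      constructor
      · intro h hm
        obtain ⟨j, hj, hlt⟩ := find_enum_mem x pre (x :: rest) 0 hm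
        rw [ha, hj] at h
        simp only [Option.map_some, Option.some.injEq] at h
        omega
      · intro hm
        rw [ha, find_enum_not_mem x rest pre 0 hm]
        simp
    have hC2 : ((pre.length : Int) + 1 = (a.length : Int) ∨
        PySem.List.pyGet? a ((pre.length : Int) + 1) ≠ some x) ↔ rest.head? ≠ some x := by
      have hlen : a.length = pre.length + 1 + rest.length := by
        rw [ha]; simp; omega
      have hget : PySem.List.pyGet? a ((pre.length : Int) + 1) = rest.head? := by
        have : ((pre.length : Int) + 1) = ((pre.length + 1 : Nat) : Int) := by push_cast; ring
        rw [this, PySem.List.pyGet?_natCast, ha]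
        rw [show pre ++ x :: rest = (pre ++ [x]) ++ rest by simp]
        rw [List.getElem?_append_right (by simp)]
        simp [List.head?_eq_getElem?]
      rw [hget]
      constructor
      · rintro (h | h)
        · have : rest.length = 0 := by omega
          rw [List.length_eq_zero_iff.mp this]
          simp
        · exact h
      · intro h; exact Or.inr h
    by_cases hcase : x ∉ pre ∧ rest.head? ≠ some x
    · rw [if_pos ⟨hC1.mpr hcase.1, hC2.mpr hcase.2⟩]
      conv_rhs => rw [gspec]
      rw [if_pos hcase]
    · have : ¬ (fi.get? x = some (pre.length : Int) ∧ ((pre.length : Int) + 1 = (a.length : Int) ∨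
          PySem.List.pyGet? a ((pre.length : Int) + 1) ≠ some x)) := by
        intro ⟨h1, h2⟩
        exact hcase ⟨hC1.mp h1, hC2.mp h2⟩
      rw [if_neg this]
      conv_rhs => rw [gspec]
      rw [if_neg hcase]
      have harith : (pre.length : Int) + 1 = ((pre ++ [x]).length : Int) := by
        simp
      rw [harith]
      exact ih (pre ++ [x]) (by simp [ha])

lemma findSingles_eq_gspec (daArray : List Int) : findSingles daArray = gspec [] daArray := by
  cases daArray with
  | nil => rfl
  | cons x rest =>
    show findSinglesGo PySem.Dict.empty none (x :: rest) = gspec [] (x :: rest)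
    simp only [findSinglesGo]
    rw [if_neg (by simp [PySem.Dict.contains_empty])]
    refine goA_eq rest [] x _ ?_ ?_
    · intro v
      rw [PySem.Dict.getD_insert, count_app [] x v]
      by_cases hvx : v = x
      · subst hvx; simp
      · rw [if_neg hvx, if_neg (fun h => hvx h.symm)]
        simp
    · intro v
      rw [PySem.Dict.contains_insert, PySem.Dict.contains_empty]
      by_cases hvx : v = x <;> simp [hvx]

lemma findSingles_alt_eq_gspec (daArray : List Int) :
    findSingles_alt daArray = gspec [] daArray := by
  show findSinglesScan daArray (daArray.length : Int) _ (PySem.List.enumerate daArray)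
      = gspec [] daArray
  have h0 : (PySem.List.enumerate daArray 0) = PySem.List.enumerate daArray ((([] : List Int).length : Nat) : Int) := by
    norm_num
  rw [h0]
  refine scanB_eq daArray _ ?_ daArray [] rfl
  intro v
  rw [fold_first, PySem.Dict.get?_empty, Option.none_or, ← h0]

-- ===== VERDICT (by name: the statement is the Claim_ definition above) =====
theorem findSingles_spec : Claim_equal_findSingles := by
  intro daArray _
  unfold Spec_findSingles
  rw [findSingles_eq_gspec, findSingles_alt_eq_gspec]
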